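-- pv_equiv track=rewrite | github.com/vaneceka/idk | checker/checks/excel/data_process/non_copyable_formula_check.py | _split_into_vertical_blocks
-- ===== SOURCE A (Python) =====
-- def _split_into_vertical_blocks(items):
--     """
--     Rozdělí položky do souvislých vertikálních bloků podle řádků.
--
--     Args:
--         items: Seznam položek seřazených podle řádků.
--
--     Returns:
--         Seznam bloků s navazujícími řádky.
--     """
--     blocks = []
--     current = [items[0]]
--
--     for prev, cur in zip(items, items[1:]):
--         if cur[0] == prev[0] + 1:
--             current.append(cur)
--         else:
--             if len(current) >= 2:
--                 blocks.append(current)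
--             current = [cur]
--
--     if len(current) >= 2:
--         blocks.append(current)
--
--     return blocks
-- ===== SOURCE B (Python) =====
-- def _split_into_vertical_blocks(items):
--     # Scan back-to-front, grouping contiguous-row runs first, then filter by length.
--     tmp = []  # groups found right-to-left; each group holds its rows in descending order
--     for it in reversed(items):
--         if tmp and tmp[-1][-1][0] == it[0] + 1:
--             tmp[-1].append(it)
--         else:
--             tmp.append([it])
--     return [g[::-1] for g in reversed(tmp) if len(g) >= 2]
-- ===== Notes on version B (the rewrite author's own statement) =====
-- stated objective: alternative
-- what changed: B scans the list back-to-front, first building all contiguous-row runs in one grouping pass and only then filtering runs by length >= 2 in a separate comprehension, instead of A's forward zip(items, items[1:]) scan with a blocks/current accumulator and inline emission.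
-- outside the precondition, e.g. on _split_into_vertical_blocks([]): A raises IndexError, B returns []
import Mathlib
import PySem

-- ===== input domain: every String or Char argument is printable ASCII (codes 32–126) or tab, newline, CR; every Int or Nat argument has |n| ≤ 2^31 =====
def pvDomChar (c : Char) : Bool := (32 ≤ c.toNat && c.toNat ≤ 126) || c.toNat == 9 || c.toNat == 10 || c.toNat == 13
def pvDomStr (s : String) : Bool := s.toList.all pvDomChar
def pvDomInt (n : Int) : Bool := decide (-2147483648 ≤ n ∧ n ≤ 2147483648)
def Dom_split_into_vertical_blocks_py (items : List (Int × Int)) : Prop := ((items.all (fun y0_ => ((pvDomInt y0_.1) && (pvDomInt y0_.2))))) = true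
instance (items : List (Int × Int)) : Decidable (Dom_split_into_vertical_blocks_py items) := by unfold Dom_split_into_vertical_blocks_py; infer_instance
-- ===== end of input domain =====

-- B scans the list back-to-front, first grouping all contiguous-row runs and only then
-- filtering by length (objective: alternative decomposition, same O(n) cost).

-- ===== PORT A =====
-- Python A: blocks/current accumulator over zip(items, items[1:]), emitting current
-- inline whenever a run breaks; items[0] raises IndexError on [] (excluded by Pre_).
def split_into_vertical_blocks_py (items : List (Int × Int)) : List (List (Int × Int)) :=
  match items with
  | [] => []   -- Python raises IndexError here (items[0]); outside Pre_
  | x :: _ =>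
    let st := (items.zip items.tail).foldl
      (fun (st : List (List (Int × Int)) × List (Int × Int)) (pc : (Int × Int) × (Int × Int)) =>
        let (blocks, current) := st
        let (prev, cur) := pc
        if cur.1 = prev.1 + 1 then (blocks, current ++ [cur])
        else if 2 ≤ current.length then (blocks ++ [current], [cur])
        else (blocks, [cur]))
      ([], [x])
    if 2 ≤ st.2.length then st.1 ++ [st.2] else st.1

-- ===== PORT B =====
-- Source B: one pass over reversed(items) appending to tmp (groups right-to-left, each
-- group with rows in descending order), then the comprehension
-- [g[::-1] for g in reversed(tmp) if len(g) >= 2]  (g[::-1] = List.reverse).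
def split_into_vertical_blocks_py_alt (items : List (Int × Int)) : List (List (Int × Int)) :=
  let tmp := items.reverse.foldl
    (fun (tmp : List (List (Int × Int))) (it : Int × Int) =>
      match tmp.getLast? with                      -- tmp[-1] (None when tmp empty)
      | some g =>
        match g.getLast? with                      -- tmp[-1][-1]
        | some last =>
          if last.1 = it.1 + 1 then tmp.dropLast ++ [g ++ [it]]   -- tmp[-1].append(it)
          else tmp ++ [[it]]
        | none => tmp ++ [[it]]
      | none => tmp ++ [[it]]) []
  (tmp.reverse.filter (fun g => 2 ≤ g.length)).map List.reverse

-- ===== PRECONDITION & SPEC =====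
-- Pre_ excludes only the empty list, on which Python A raises IndexError (items[0]); B returns [] there.
def Pre_split_into_vertical_blocks_py (items : List (Int × Int)) : Prop := items ≠ []
instance (items : List (Int × Int)) : Decidable (Pre_split_into_vertical_blocks_py items) := by
  unfold Pre_split_into_vertical_blocks_py; infer_instance
def pvWitness_split_into_vertical_blocks_py : (List (Int × Int)) := [(1, 5), (2, 6), (4, 7)]

def Spec_split_into_vertical_blocks_py (items : List (Int × Int)) (out : List (List (Int × Int))) : Prop := out = split_into_vertical_blocks_py_alt items
instance (items : List (Int × Int)) (out : List (List (Int × Int))) : Decidable (Spec_split_into_vertical_blocks_py items out) := by unfold Spec_split_into_vertical_blocks_py; infer_instance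

-- ===== CLAIM (what is proved, stated in full; the proofs are below) =====
def Claim_equal_split_into_vertical_blocks_py : Prop := ∀ (items : List (Int × Int)), Dom_split_into_vertical_blocks_py items → Pre_split_into_vertical_blocks_py items → Spec_split_into_vertical_blocks_py items (split_into_vertical_blocks_py items)

-- ===== LEMMAS AND PROOFS =====

-- Canonical forward grouping of the list into contiguous-row runs; both ports reduce to
-- filtering this by length ≥ 2.
def pvGroup : List (Int × Int) → List (List (Int × Int))
  | [] => []
  | it :: rest =>
    match pvGroup rest with
    | (y :: g) :: gs => if y.1 = it.1 + 1 then (it :: y :: g) :: gs else [it] :: (y :: g) :: gs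
    | gs => [it] :: gs

def pvStepA (st : List (List (Int × Int)) × List (Int × Int)) (pc : (Int × Int) × (Int × Int)) :
    List (List (Int × Int)) × List (Int × Int) :=
  let (blocks, current) := st
  let (prev, cur) := pc
  if cur.1 = prev.1 + 1 then (blocks, current ++ [cur])
  else if 2 ≤ current.length then (blocks ++ [current], [cur])
  else (blocks, [cur])

def pvFinish (current : List (Int × Int)) (prev : Int × Int) : List (Int × Int) → List (List (Int × Int))
  | [] => if 2 ≤ current.length then [current] else []
  | c :: rest =>
    if c.1 = prev.1 + 1 then pvFinish (current ++ [c]) c rest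
    else (if 2 ≤ current.length then [current] else []) ++ pvFinish [c] c rest

def pvMerge (current : List (Int × Int)) (prev : Int × Int) : List (List (Int × Int)) → List (List (Int × Int))
  | (y :: g) :: gs => if y.1 = prev.1 + 1 then (current ++ y :: g) :: gs else current :: (y :: g) :: gs
  | gs => current :: gs

def pvLen2 (g : List (Int × Int)) : Bool := decide (2 ≤ g.length)

theorem pvFoldA_eq_finish (rest : List (Int × Int)) :
    ∀ (blocks current : List _) (prev : Int × Int),
    (let st := (List.zip (prev :: rest) rest).foldl pvStepA (blocks, current)
     if 2 ≤ st.2.length then st.1 ++ [st.2] else st.1)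
      = blocks ++ pvFinish current prev rest := by
  induction rest with
  | nil =>
    intro blocks current prev
    simp only [List.zip_nil_right, List.foldl_nil, pvFinish]
    split <;> simp
  | cons c rest ih =>
    intro blocks current prev
    simp only [List.zip_cons_cons, List.foldl_cons, pvFinish, pvStepA]
    by_cases h : c.1 = prev.1 + 1
    · simp [h, ih]
    · by_cases h2 : 2 ≤ current.length
      · simp [h, h2, ih, List.append_assoc]
      · simp [h, h2, ih]

theorem pvMerge_singleton (c : Int × Int) (rest : List (Int × Int)) :
    pvMerge [c] c (pvGroup rest) = pvGroup (c :: rest) := by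
  cases hg : pvGroup rest with
  | nil => simp [pvMerge, pvGroup, hg]
  | cons g gs =>
    cases g with
    | nil => simp [pvMerge, pvGroup, hg]
    | cons y g' => simp [pvMerge, pvGroup, hg]

theorem pvFinish_eq_filter_merge (rest : List (Int × Int)) :
    ∀ (current : List (Int × Int)) (prev : Int × Int),
    pvFinish current prev rest = (pvMerge current prev (pvGroup rest)).filter pvLen2 := by
  induction rest with
  | nil =>
    intro current prev
    simp only [pvFinish, pvGroup, pvMerge, List.filter_cons, List.filter_nil, pvLen2]
    by_cases h2 : 2 ≤ current.length
    · simp [h2]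
    · simp [h2]
  | cons c rest ih =>
    intro current prev
    simp only [pvFinish]
    by_cases h : c.1 = prev.1 + 1
    · rw [if_pos h, ih]
      congr 1
      -- pvMerge (current ++ [c]) c (pvGroup rest) = pvMerge current prev (pvGroup (c :: rest))
      cases hg : pvGroup rest with
      | nil => simp [pvMerge, pvGroup, hg, h]
      | cons g gs =>
        cases g with
        | nil => simp [pvMerge, pvGroup, hg, h]
        | cons y g' =>
          by_cases hy : y.1 = c.1 + 1
          · have hy' : y.1 = prev.1 + 1 + 1 := by rw [hy, h]
            simp [pvMerge, pvGroup, hg, hy, h]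
          · have hy' : ¬ y.1 = prev.1 + 1 + 1 := by rw [h] at hy; exact hy
            simp [pvMerge, pvGroup, hg, hy', h]
    · rw [if_neg h, ih, pvMerge_singleton]
      have hhead : ∃ t gs2, pvGroup (c :: rest) = (c :: t) :: gs2 := by
        cases hg : pvGroup rest with
        | nil => exact ⟨[], [], by simp [pvGroup, hg]⟩
        | cons g gs =>
          cases g with
          | nil => exact ⟨[], [] :: gs, by simp [pvGroup, hg]⟩
          | cons y g' =>
            by_cases hy : y.1 = c.1 + 1
            · exact ⟨y :: g', gs, by simp [pvGroup, hg, hy]⟩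
            · exact ⟨[], (y :: g') :: gs, by simp [pvGroup, hg, hy]⟩
      obtain ⟨t, gs2, hG⟩ := hhead
      rw [hG]
      have hm : pvMerge current prev ((c :: t) :: gs2) = current :: (c :: t) :: gs2 := by
        simp [pvMerge, h]
      rw [hm, List.filter_cons]
      by_cases h2 : 2 ≤ current.length
      · simp [pvLen2, h2, List.filter_cons]
      · simp [pvLen2, h2, List.filter_cons]

-- A on a nonempty list equals the filtered canonical grouping.
theorem portA_eq_filter_group (x : Int × Int) (xs : List (Int × Int)) :
    split_into_vertical_blocks_py (x :: xs) = (pvGroup (x :: xs)).filter pvLen2 := by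
  have h := pvFoldA_eq_finish xs [] [x] x
  simp only [split_into_vertical_blocks_py]
  have hstep : ∀ st pc, (fun (st : List (List (Int × Int)) × List (Int × Int))
      (pc : (Int × Int) × (Int × Int)) =>
        let (blocks, current) := st
        let (prev, cur) := pc
        if cur.1 = prev.1 + 1 then (blocks, current ++ [cur])
        else if 2 ≤ current.length then (blocks ++ [current], [cur])
        else (blocks, [cur])) st pc = pvStepA st pc := by
    intro st pc; rfl
  simp only [List.tail_cons]
  rw [show ((x :: xs).zip xs) = (List.zip (x :: xs) xs) from rfl]
  rw [funext (fun st => funext (fun pc => hstep st pc))]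
  rw [h, List.nil_append, pvFinish_eq_filter_merge, pvMerge_singleton]

-- tmp encoding invariant for B's backward fold.
def pvEnc (gs : List (List (Int × Int))) : List (List (Int × Int)) :=
  (gs.map List.reverse).reverse

def pvStepB (tmp : List (List (Int × Int))) (it : Int × Int) : List (List (Int × Int)) :=
  match tmp.getLast? with
  | some g =>
    match g.getLast? with
    | some last =>
      if last.1 = it.1 + 1 then tmp.dropLast ++ [g ++ [it]]
      else tmp ++ [[it]]
    | none => tmp ++ [[it]]
  | none => tmp ++ [[it]]

theorem pvStepB_enc (x : Int × Int) (gs : List (List (Int × Int))) :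
    pvStepB (pvEnc gs) x = pvEnc (match gs with
      | (y :: g) :: gs' => if y.1 = x.1 + 1 then (x :: y :: g) :: gs' else [x] :: (y :: g) :: gs'
      | gs' => [x] :: gs') := by
  cases gs with
  | nil => simp [pvStepB, pvEnc]
  | cons g gs' =>
    cases g with
    | nil => simp [pvStepB, pvEnc]
    | cons y g' =>
      by_cases hy : y.1 = x.1 + 1
      · simp [pvStepB, pvEnc, hy]
      · simp [pvStepB, pvEnc, hy]

theorem pvFoldB_eq_group (xs : List (Int × Int)) :
    xs.reverse.foldl pvStepB [] = pvEnc (pvGroup xs) := by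
  induction xs with
  | nil => simp [pvEnc, pvGroup]
  | cons x xs ih =>
    rw [List.reverse_cons, List.foldl_append, ih, List.foldl_cons, List.foldl_nil,
        pvStepB_enc]
    rfl

theorem pvFilterMapRev (G : List (List (Int × Int))) :
    ((G.map List.reverse).filter (fun g => decide (2 ≤ g.length))).map List.reverse
      = G.filter pvLen2 := by
  induction G with
  | nil => rfl
  | cons g gs ih =>
    simp only [List.map_cons, List.filter_cons, List.length_reverse]
    by_cases h2 : 2 ≤ g.length
    · simp [pvLen2, h2, ih]
    · simp [pvLen2, h2, ih]

theorem portB_eq_filter_group (items : List (Int × Int)) :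
    split_into_vertical_blocks_py_alt items = (pvGroup items).filter pvLen2 := by
  show ((items.reverse.foldl pvStepB []).reverse.filter
      (fun g => decide (2 ≤ g.length))).map List.reverse = (pvGroup items).filter pvLen2
  rw [pvFoldB_eq_group, pvEnc, List.reverse_reverse, pvFilterMapRev]

-- ===== VERDICT (by name: the statement is the Claim_ definition above) =====
theorem split_into_vertical_blocks_py_spec : Claim_equal_split_into_vertical_blocks_py := by
  intro items _ hpre
  unfold Spec_split_into_vertical_blocks_py
  cases items with
  | nil => exact absurd rfl hpre
  | cons x xs => rw [portA_eq_filter_group, portB_eq_filter_group]
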